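-- pv_equiv track=rewrite | github.com/Awastihuddin/kasirbakso | kasirbakso.py | cari_harga
-- ===== SOURCE A (Python) =====
-- menu = {
--     'Makanan': {
--         'Bakso': {
--             'Bakso Biasa': 1000, 'Bakso Urat': 1500, 'Bakso Besar': 2000, 'Bakso Puyuh': 2500, 'Bakso Rawit': 6000, 'Bakso Mercon': 7000, 'Bakso Keju': 7000, 'Bakso Beranak': 10000
--             },
--         'Mie Ayam': {
--             'Mie Ayam Biasa': 5000, 'Mie Ayam Bakso': 8000, 'Mie Ayam Ceker': 8000, 'Mie Ayam Spesial': 11000, 'Mie Ayam Jumbo': 13000, 'Mie Ayam Extra Toping': 15000, 'Mie Level': 10000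
--             }
--     },
--     'Minuman': {
--         'Air Mineral Biasa': 2000, 'Es Teh': 3000, 'Es Jeruk': 4000, 'Es Degan': 5000, 'Es Campur': 6000, 'Es Soda Gembira': 6500, 'Es Susu Coklat': 6000, 'Es Blewah': 7000
--     },
--     'Sampingan': {
--         'Pangsit': 1000, 'Ceker': 3000, 'Lontong': 2500, 'Tahu': 2000, 'Sate Telur Puyuh': 3000, 'Tahu Bakso': 2500
--     }
-- }
--
-- def cari_harga(nama):
--     nama = nama.lower()
--     for kategori, items in menu.items():
--         if isinstance(items, dict):
--             for subkategori, subitems in items.items():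
--                 if isinstance(subitems, dict):
--                     for item_nama, harga in subitems.items():
--                         if item_nama.lower() == nama:
--                             return harga
--                 else:
--                     if subkategori.lower() == nama:
--                         return subitems
--     return None
-- ===== SOURCE B (Python) =====
-- menu = {
--     'Makanan': {
--         'Bakso': {
--             'Bakso Biasa': 1000, 'Bakso Urat': 1500, 'Bakso Besar': 2000, 'Bakso Puyuh': 2500, 'Bakso Rawit': 6000, 'Bakso Mercon': 7000, 'Bakso Keju': 7000, 'Bakso Beranak': 10000
--             },
--         'Mie Ayam': {
--             'Mie Ayam Biasa': 5000, 'Mie Ayam Bakso': 8000, 'Mie Ayam Ceker': 8000, 'Mie Ayam Spesial': 11000, 'Mie Ayam Jumbo': 13000, 'Mie Ayam Extra Toping': 15000, 'Mie Level': 10000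
--             }
--     },
--     'Minuman': {
--         'Air Mineral Biasa': 2000, 'Es Teh': 3000, 'Es Jeruk': 4000, 'Es Degan': 5000, 'Es Campur': 6000, 'Es Soda Gembira': 6500, 'Es Susu Coklat': 6000, 'Es Blewah': 7000
--     },
--     'Sampingan': {
--         'Pangsit': 1000, 'Ceker': 3000, 'Lontong': 2500, 'Tahu': 2000, 'Sate Telur Puyuh': 3000, 'Tahu Bakso': 2500
--     }
-- }
--
-- def _flatten(d):
--     out = []
--     for k, v in d.items():
--         if isinstance(v, dict):
--             out += _flatten(v)
--         else:
--             out.append((k.lower(), v))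
--     return out
--
-- _PRICES = _flatten(menu)
--
-- def cari_harga(nama):
--     n = nama.lower()
--     for k, v in _PRICES:
--         if k == n:
--             return v
--     return None
-- ===== Notes on version B (the rewrite author's own statement) =====
-- stated objective: idiomatic
-- what changed: The nested three-level scan inside cari_harga is replaced by a flat price list (lowercased leaf name, price) built once from the menu by a recursive flatten, so each call is a single first-match scan over that list.
import Mathlib
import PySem

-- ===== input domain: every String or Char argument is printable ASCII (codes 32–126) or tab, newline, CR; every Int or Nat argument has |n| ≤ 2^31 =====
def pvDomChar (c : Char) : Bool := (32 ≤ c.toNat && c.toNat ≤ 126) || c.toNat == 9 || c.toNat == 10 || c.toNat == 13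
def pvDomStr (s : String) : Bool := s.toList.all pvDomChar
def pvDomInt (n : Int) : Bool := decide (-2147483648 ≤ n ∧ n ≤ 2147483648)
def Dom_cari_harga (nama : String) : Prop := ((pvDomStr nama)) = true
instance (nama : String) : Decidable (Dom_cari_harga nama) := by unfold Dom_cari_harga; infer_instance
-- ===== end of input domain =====

-- B replaces the nested three-level scan by a flat (lowercased name, price) list built
-- once from the menu, so each lookup is a single first-match scan (objective: idiomatic).

-- The module-level menu: values at the second level are either a sub-dict of prices or a price.
inductive MenuVal
  | int (p : Int)
  | dict (l : List (String × Int))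

-- shared module constant (the literal `menu` dict, shared by A and B like the Python module global)
def menuLit : List (String × List (String × MenuVal)) :=
  [("Makanan",
     [("Bakso", .dict [("Bakso Biasa", 1000), ("Bakso Urat", 1500), ("Bakso Besar", 2000), ("Bakso Puyuh", 2500), ("Bakso Rawit", 6000), ("Bakso Mercon", 7000), ("Bakso Keju", 7000), ("Bakso Beranak", 10000)]),
      ("Mie Ayam", .dict [("Mie Ayam Biasa", 5000), ("Mie Ayam Bakso", 8000), ("Mie Ayam Ceker", 8000), ("Mie Ayam Spesial", 11000), ("Mie Ayam Jumbo", 13000), ("Mie Ayam Extra Toping", 15000), ("Mie Level", 10000)])]),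
   ("Minuman",
     [("Air Mineral Biasa", .int 2000), ("Es Teh", .int 3000), ("Es Jeruk", .int 4000), ("Es Degan", .int 5000), ("Es Campur", .int 6000), ("Es Soda Gembira", .int 6500), ("Es Susu Coklat", .int 6000), ("Es Blewah", .int 7000)]),
   ("Sampingan",
     [("Pangsit", .int 1000), ("Ceker", .int 3000), ("Lontong", .int 2500), ("Tahu", .int 2000), ("Sate Telur Puyuh", .int 3000), ("Tahu Bakso", .int 2500)])]

-- ===== PORT A =====
-- innermost loop: for item_nama, harga in subitems.items(): if item_nama.lower() == nama: return harga
def pvAScanItems (l : List (String × Int)) (nama : String) : Option Int :=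
  match l with
  | [] => none
  | (k, p) :: rest => if PySem.Str.lower k = nama then some p else pvAScanItems rest nama

-- middle loop: for subkategori, subitems in items.items(): isinstance branch
def pvAScanSub (l : List (String × MenuVal)) (nama : String) : Option Int :=
  match l with
  | [] => none
  | (k, v) :: rest =>
    match v with
    | .dict sub =>
      match pvAScanItems sub nama with
      | some p => some p
      | none => pvAScanSub rest nama
    | .int p =>
      if PySem.Str.lower k = nama then some p else pvAScanSub rest nama

-- outer loop: for kategori, items in menu.items(); `isinstance(items, dict)` is always True on the literal menu
def pvAScanTop (l : List (String × List (String × MenuVal))) (nama : String) : Option Int :=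
  match l with
  | [] => none
  | (_, items) :: rest =>
    match pvAScanSub items nama with
    | some p => some p
    | none => pvAScanTop rest nama

def cari_harga (nama : String) : Option Int :=
  pvAScanTop menuLit (PySem.Str.lower nama)

-- ===== PORT B =====
-- _flatten on an innermost dict (all values are ints): each leaf becomes (k.lower(), v)
def pvBFlatSub (l : List (String × MenuVal)) : List (String × Int) :=
  match l with
  | [] => []
  | (_, .dict sub) :: rest => (sub.map fun kv => (PySem.Str.lower kv.1, kv.2)) ++ pvBFlatSub rest
  | (k, .int p) :: rest => (PySem.Str.lower k, p) :: pvBFlatSub rest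

def pvBFlatTop (l : List (String × List (String × MenuVal))) : List (String × Int) :=
  match l with
  | [] => []
  | (_, items) :: rest => pvBFlatSub items ++ pvBFlatTop rest

-- _PRICES = _flatten(menu), computed once at module load
def pvBPrices : List (String × Int) := pvBFlatTop menuLit

-- first-match scan of the flat list
def pvBLookup (l : List (String × Int)) (n : String) : Option Int :=
  match l with
  | [] => none
  | (k, p) :: rest => if k = n then some p else pvBLookup rest n

def cari_harga_alt (nama : String) : Option Int :=
  pvBLookup pvBPrices (PySem.Str.lower nama)

-- ===== PRECONDITION & SPEC =====
def Spec_cari_harga (nama : String) (out : Option Int) : Prop := out = cari_harga_alt nama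
instance (nama : String) (out : Option Int) : Decidable (Spec_cari_harga nama out) := by unfold Spec_cari_harga; infer_instance

-- ===== CLAIM (what is proved, stated in full; the proofs are below) =====
def Claim_equal_cari_harga : Prop := ∀ (nama : String), Dom_cari_harga nama → Spec_cari_harga nama (cari_harga nama)

-- ===== LEMMAS AND PROOFS =====
theorem pvBLookup_append (a b : List (String × Int)) (n : String) :
    pvBLookup (a ++ b) n =
      match pvBLookup a n with
      | some p => some p
      | none => pvBLookup b n := by
  induction a with
  | nil => simp [pvBLookup]
  | cons kv rest ih =>
    obtain ⟨k, p⟩ := kv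
    by_cases h : k = n <;> simp [pvBLookup, h, ih]

theorem scanItems_eq (l : List (String × Int)) (n : String) :
    pvAScanItems l n = pvBLookup (l.map fun kv => (PySem.Str.lower kv.1, kv.2)) n := by
  induction l with
  | nil => rfl
  | cons kv rest ih =>
    obtain ⟨k, p⟩ := kv
    by_cases h : PySem.Str.lower k = n <;> simp [pvAScanItems, pvBLookup, h, ih]

theorem scanSub_eq (l : List (String × MenuVal)) (n : String) :
    pvAScanSub l n = pvBLookup (pvBFlatSub l) n := by
  induction l with
  | nil => rfl
  | cons kv rest ih =>
    obtain ⟨k, v⟩ := kv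
    cases v with
    | dict sub =>
      simp only [pvAScanSub, pvBFlatSub, pvBLookup_append, scanItems_eq, ih]
    | int p =>
      by_cases h : PySem.Str.lower k = n <;> simp [pvAScanSub, pvBFlatSub, pvBLookup, h, ih]

theorem scanTop_eq (l : List (String × List (String × MenuVal))) (n : String) :
    pvAScanTop l n = pvBLookup (pvBFlatTop l) n := by
  induction l with
  | nil => rfl
  | cons kv rest ih =>
    obtain ⟨k, items⟩ := kv
    simp only [pvAScanTop, pvBFlatTop, pvBLookup_append, scanSub_eq, ih]

-- ===== VERDICT (by name: the statement is the Claim_ definition above) =====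
theorem cari_harga_spec : Claim_equal_cari_harga := by
  intro nama _
  unfold Spec_cari_harga cari_harga cari_harga_alt pvBPrices
  exact scanTop_eq menuLit (PySem.Str.lower nama)
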